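-- pv_equiv track=rewrite | github.com/zzzzini/coding_study | 프로그래머스/1/258712. 가장 많이 받은 선물/가장 많이 받은 선물.py | solution
-- ===== SOURCE A (Python) =====
-- def solution(friends, gifts):
--     answer = 0
--     giftdict = {k:{j:0 for j in friends if j!=k} for k in friends}
--     gives = {k:0 for k in friends}
--     gets = {k:0 for k in friends}
--
--     for item in gifts:
--         send, target = item.split()
--         giftdict[send][target] += 1
--         gives[send] += 1
--         gets[target] += 1
--
--     for k, v in giftdict.items():
--         cnt = 0
--         for kk, vv in giftdict[k].items():
--             if giftdict[k][kk] > giftdict[kk][k]: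
--                 cnt += 1
--             elif giftdict[k][kk] == giftdict[kk][k]:
--                 if gives[k] - gets[k] > gives[kk] - gets[kk]:
--                     cnt += 1
--         answer = max(answer, cnt)
--
--     return answer
-- ===== SOURCE B (Python) =====
-- def solution(friends, gifts):
--     order = []
--     for f in friends:
--         if f not in order:
--             order.append(f)
--     pair = {}
--     for g in gifts:
--         s, t = g.split()
--         pair[(s, t)] = pair.get((s, t), 0) + 1
--     net = {}
--     for k in order:
--         net[k] = sum(pair.get((k, j), 0) - pair.get((j, k), 0) for j in order)
--     wins = {k: 0 for k in order}
--     for i, a in enumerate(order):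
--         for b in order[i + 1:]:
--             if pair.get((a, b), 0) > pair.get((b, a), 0) or (pair.get((a, b), 0) == pair.get((b, a), 0) and net[a] > net[b]):
--                 wins[a] += 1
--             elif pair.get((b, a), 0) > pair.get((a, b), 0) or (pair.get((b, a), 0) == pair.get((a, b), 0) and net[b] > net[a]):
--                 wins[b] += 1
--     return max(wins.values(), default=0)
-- ===== Notes on version B (the rewrite author's own statement) =====
-- stated objective: alternative
-- what changed: B replaces A's nested dict-of-dicts plus per-person rescan of every opponent by a flat (sender,target)-keyed counter, a derived net gift index, and a single pass over unordered pairs of distinct friends that awards one point to each pair's winner, taking the max win tally at the end.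
import Mathlib
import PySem

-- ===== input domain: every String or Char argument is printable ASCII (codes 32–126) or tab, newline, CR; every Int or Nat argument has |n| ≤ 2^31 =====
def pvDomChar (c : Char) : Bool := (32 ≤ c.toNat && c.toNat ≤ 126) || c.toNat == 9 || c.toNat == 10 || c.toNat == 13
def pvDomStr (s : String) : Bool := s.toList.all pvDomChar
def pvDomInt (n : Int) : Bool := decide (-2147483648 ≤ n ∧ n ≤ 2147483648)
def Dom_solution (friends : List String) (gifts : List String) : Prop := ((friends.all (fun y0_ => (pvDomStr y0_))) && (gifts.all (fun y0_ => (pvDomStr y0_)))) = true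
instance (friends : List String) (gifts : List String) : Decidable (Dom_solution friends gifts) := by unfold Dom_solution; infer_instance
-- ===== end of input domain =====

-- B replaces A's nested dict-of-dicts and per-person rescan of every opponent by a flat
-- (sender,target) counter, a derived net index, and a single pass over unordered pairs of
-- distinct friends that awards one point to each pair's winner (alternative decomposition,
-- same asymptotic cost).

-- Both Pythons evaluate `item.split()` and unpack it into exactly two names;
-- this shared helper is that step (none = the unpacking would raise).
def split2 (g : String) : Option (String × String) :=
  match PySem.Str.split₀ g with
  | [s, t] => some (s, t)
  | _ => none

-- ===== PORT A =====
-- {j:0 for j in friends if j!=k}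
def initInner (friends : List String) (k : String) : PySem.Dict String Int :=
  friends.foldl (fun dd j => if j ≠ k then dd.insert j 0 else dd) PySem.Dict.empty

-- {k:{…} for k in friends}
def giftdict0 (friends : List String) : PySem.Dict String (PySem.Dict String Int) :=
  friends.foldl (fun d k => d.insert k (initInner friends k)) PySem.Dict.empty

-- {k:0 for k in friends}
def zeros0 (friends : List String) : PySem.Dict String Int :=
  friends.foldl (fun d k => d.insert k 0) PySem.Dict.empty

-- body of `for item in gifts`; on a malformed item Python raises (unpacking /
-- KeyError) — such inputs are outside Pre_; `d[x] += 1` on a present key is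
-- Dict.modify with the stated default.
def stepA (st : PySem.Dict String (PySem.Dict String Int) × PySem.Dict String Int × PySem.Dict String Int)
    (item : String) :
    PySem.Dict String (PySem.Dict String Int) × PySem.Dict String Int × PySem.Dict String Int :=
  match split2 item with
  | some (send, target) =>
      (st.1.modify send PySem.Dict.empty (fun inner => inner.modify target 0 (· + 1)),
       st.2.1.modify send 0 (· + 1),
       st.2.2.modify target 0 (· + 1))
  | none => st

def solution (friends : List String) (gifts : List String) : Int :=
  let st := gifts.foldl stepA (giftdict0 friends, zeros0 friends, zeros0 friends)
  let gd := st.1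
  let gv := st.2.1
  let gt := st.2.2
  -- for k, v in giftdict.items(): … answer = max(answer, cnt)
  gd.items.foldl (fun answer kv =>
    let k := kv.1
    let cnt := (gd.getD k PySem.Dict.empty).items.foldl (fun cnt kkvv =>
      let kk := kkvv.1
      if (gd.getD k PySem.Dict.empty).getD kk 0 > (gd.getD kk PySem.Dict.empty).getD k 0 then cnt + 1
      else if (gd.getD k PySem.Dict.empty).getD kk 0 = (gd.getD kk PySem.Dict.empty).getD k 0 then
        (if gv.getD k 0 - gt.getD k 0 > gv.getD kk 0 - gt.getD kk 0 then cnt + 1 else cnt)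
      else cnt) (0 : Int)
    max answer cnt) 0

-- ===== PORT B =====
-- body of the pair-counting loop over gifts
def stepP (d : PySem.Dict (String × String) Int) (g : String) : PySem.Dict (String × String) Int :=
  match split2 g with
  | some (s, t) => d.insert (s, t) (d.getD (s, t) 0 + 1)
  | none => d

-- body of the inner pair loop: award the pair (a, b) to its winner
def stepW (pair : PySem.Dict (String × String) Int) (net : PySem.Dict String Int)
    (a : String) (w : PySem.Dict String Int) (b : String) : PySem.Dict String Int :=
  if pair.getD (a, b) 0 > pair.getD (b, a) 0 ∨
     (pair.getD (a, b) 0 = pair.getD (b, a) 0 ∧ net.getD a 0 > net.getD b 0) then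
    w.insert a (w.getD a 0 + 1)
  else if pair.getD (b, a) 0 > pair.getD (a, b) 0 ∨
     (pair.getD (b, a) 0 = pair.getD (a, b) 0 ∧ net.getD b 0 > net.getD a 0) then
    w.insert b (w.getD b 0 + 1)
  else w

def solution_alt (friends : List String) (gifts : List String) : Int :=
  let order : List String := friends.foldl (fun u f => if u.contains f then u else u ++ [f]) []
  let pair : PySem.Dict (String × String) Int := gifts.foldl stepP PySem.Dict.empty
  let net : PySem.Dict String Int :=
    order.foldl (fun d k =>
      d.insert k ((order.map (fun j => pair.getD (k, j) 0 - pair.getD (j, k) 0)).sum)) PySem.Dict.empty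
  let wins0 : PySem.Dict String Int := order.foldl (fun d k => d.insert k 0) PySem.Dict.empty
  let wins := (PySem.List.enumerate order).foldl (fun w ia =>
      (PySem.List.slice order (some (ia.1 + 1)) none).foldl (stepW pair net ia.2) w) wins0
  PySem.List.maxD wins.values (fun v => v) 0

-- ===== PRECONDITION & SPEC =====
-- Pre_ excludes exactly the inputs on which A raises: a gift item whose split is not
-- two tokens (unpacking ValueError), or a sender/target not in friends, or a self-gift
-- (KeyError in giftdict).
def wfGift (friends : List String) (g : String) : Bool :=
  match split2 g with
  | some (s, t) => friends.contains s && friends.contains t && !(s == t)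
  | none => false

def Pre_solution (friends : List String) (gifts : List String) : Prop :=
  ∀ g ∈ gifts, wfGift friends g = true
instance (friends : List String) (gifts : List String) : Decidable (Pre_solution friends gifts) := by
  unfold Pre_solution; infer_instance

def pvWitness_solution : List String × List String := (["a", "b", "c"], ["a b", "b a", "a c"])

def Spec_solution (friends : List String) (gifts : List String) (out : Int) : Prop := out = solution_alt friends gifts
instance (friends : List String) (gifts : List String) (out : Int) : Decidable (Spec_solution friends gifts out) := by unfold Spec_solution; infer_instance

-- ===== CLAIM (what is proved, stated in full; the proofs are below) =====
def Claim_equal_solution : Prop := ∀ (friends : List String) (gifts : List String), Dom_solution friends gifts → Pre_solution friends gifts → Spec_solution friends gifts (solution friends gifts)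

-- ===== LEMMAS AND PROOFS =====

-- pure counting functions both ports are reduced to
def gcnt (gifts : List String) (s t : String) : Nat :=
  gifts.countP (fun g => split2 g == some (s, t))
def scnt (gifts : List String) (s : String) : Nat :=
  gifts.countP (fun g => (split2 g).map Prod.fst == some s)
def tcnt (gifts : List String) (t : String) : Nat :=
  gifts.countP (fun g => (split2 g).map Prod.snd == some t)
def netF (gifts : List String) (k : String) : Int := (scnt gifts k : Int) - (tcnt gifts k : Int)

def winB (gifts : List String) (a b : String) : Bool :=
  decide ((gcnt gifts b a : Int) < (gcnt gifts a b : Int)) ||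
    (decide ((gcnt gifts a b : Int) = (gcnt gifts b a : Int)) && decide (netF gifts b < netF gifts a))

def scoreF (gifts : List String) (L : List String) (k : String) : Nat :=
  (L.filter (fun j => decide (j ≠ k))).countP (fun j => winB gifts k j)

def specV (gifts : List String) (L : List String) : Int :=
  L.foldl (fun ans k => max ans ((scoreF gifts L k : Int))) 0

theorem getD_foldl_insert_fun {κ ν : Type} [BEq κ] [LawfulBEq κ] [DecidableEq κ]
    (v : κ → ν) (l : List κ) (d : PySem.Dict κ ν) (k : κ) (d0 : ν) :
    (l.foldl (fun d x => d.insert x (v x)) d).getD k d0 = if k ∈ l then v k else d.getD k d0 := by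
  induction l generalizing d with
  | nil => simp
  | cons x xs ih =>
      simp only [List.foldl_cons, ih, List.mem_cons]
      by_cases hx : k ∈ xs
      · simp [hx]
      · by_cases hkx : k = x
        · simp [hkx]
        · simp [hx, hkx, PySem.Dict.getD_insert]

theorem ofList_eq_self_of_nodup {α : Type} [BEq α] [LawfulBEq α] (l : List α) (h : l.Nodup) :
    PySem.Set.ofList l = l := by
  have main : ∀ (xs s : List α), (s ++ xs).Nodup → xs.foldl PySem.Set.add s = s ++ xs := by
    intro xs
    induction xs with
    | nil => intro s _; simp
    | cons x t ih =>
        intro s hnd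
        have hx : x ∉ s := by
          intro hmem
          have := List.disjoint_of_nodup_append hnd
          exact this hmem (by simp)
        have hadd : PySem.Set.add s x = s ++ [x] := by
          simp [PySem.Set.add, PySem.Set.contains]
          intro hc
          exact absurd hc hx
        simp only [List.foldl_cons, hadd]
        rw [ih (s ++ [x]) (by simpa using hnd)]
        simp
  rw [PySem.Set.ofList_eq_foldl]
  simpa using main l [] (by simpa using h)

theorem ofList_filter {α : Type} [BEq α] [LawfulBEq α] (p : α → Bool) (l : List α) :
    PySem.Set.ofList (l.filter p) = (PySem.Set.ofList l).filter p := by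
  have hadd : ∀ (s : List α) (x : α), (PySem.Set.add s x).filter p
      = if p x then PySem.Set.add (s.filter p) x else s.filter p := by
    intro s x
    by_cases hx : x ∈ s
    · by_cases hpx : p x <;>
        simp [PySem.Set.add, PySem.Set.contains, hx, hpx, List.mem_filter]
    · by_cases hpx : p x <;>
        simp [PySem.Set.add, PySem.Set.contains, hx, hpx, List.filter_append, List.mem_filter]
  have main : ∀ (l s : List α), (l.filter p).foldl PySem.Set.add (s.filter p)
      = (l.foldl PySem.Set.add s).filter p := by
    intro l
    induction l with
    | nil => intro s; simp
    | cons x t ih =>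
        intro s
        by_cases hpx : p x
        · simp only [List.filter_cons, hpx, if_pos, List.foldl_cons]
          rw [← ih (PySem.Set.add s x), hadd s x, if_pos hpx]
        · simp only [List.filter_cons, hpx, List.foldl_cons]
          rw [← ih (PySem.Set.add s x), hadd s x, if_neg hpx]
          simp
  rw [PySem.Set.ofList_eq_foldl, PySem.Set.ofList_eq_foldl]
  simpa using main l []

-- ===== A-side lemmas =====

theorem update_nil_eq_ofList {α : Type} [BEq α] (xs : List α) :
    PySem.Set.update ([] : PySem.Set α) xs = PySem.Set.ofList xs := by
  rw [PySem.Set.ofList_eq_foldl]; rfl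

theorem getD_zeros0 (friends : List String) (k : String) : (zeros0 friends).getD k 0 = 0 := by
  unfold zeros0
  rw [getD_foldl_insert_fun (v := fun _ => (0 : Int))]
  split <;> simp

theorem getD_initInner (friends : List String) (k j : String) :
    (initInner friends k).getD j 0 = 0 := by
  unfold initInner
  rw [PySem.List.foldl_ite_eq_foldl_filter (p := fun j => j ≠ k)]
  rw [getD_foldl_insert_fun (v := fun _ => (0 : Int))]
  split <;> simp

theorem getD_giftdict0 (friends : List String) (k j : String) :
    ((giftdict0 friends).getD k PySem.Dict.empty).getD j 0 = 0 := by
  unfold giftdict0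
  rw [getD_foldl_insert_fun (v := fun k => initInner friends k)]
  split
  · exact getD_initInner friends k j
  · simp

theorem keys_initInner (friends : List String) (k : String) :
    (initInner friends k).keys = PySem.Set.ofList (friends.filter (fun j => decide (j ≠ k))) := by
  unfold initInner
  rw [PySem.List.foldl_ite_eq_foldl_filter (p := fun j => j ≠ k)]
  rw [PySem.Dict.keys_foldl_insert]
  simp [PySem.Dict.keys_empty, update_nil_eq_ofList]

theorem keys_giftdict0 (friends : List String) :
    (giftdict0 friends).keys = PySem.Set.ofList friends := by
  unfold giftdict0
  rw [PySem.Dict.keys_foldl_insert]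
  simp [PySem.Dict.keys_empty, update_nil_eq_ofList]

theorem foldA_pairs (gifts : List String) (k j : String) :
    ∀ st, (((gifts.foldl stepA st).1).getD k PySem.Dict.empty).getD j 0
      = ((st.1.getD k PySem.Dict.empty).getD j 0) + (gcnt gifts k j : Int) := by
  induction gifts with
  | nil => intro st; simp [gcnt]
  | cons g gs ih =>
      intro st
      rw [List.foldl_cons]
      rcases hs : split2 g with _ | ⟨s, t⟩
      · have hst : stepA st g = st := by simp [stepA, hs]
        rw [hst, ih]
        have hpred : (split2 g == some (k, j)) = false := by simp [hs]
        simp [gcnt, hpred]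
      · have hst : stepA st g
            = (st.1.modify s PySem.Dict.empty (fun inner => inner.modify t 0 (· + 1)),
               st.2.1.modify s 0 (· + 1), st.2.2.modify t 0 (· + 1)) := by
          simp [stepA, hs]
        rw [hst, ih]
        simp only [PySem.Dict.getD_modify]
        have hg : gcnt (g :: gs) k j = gcnt gs k j + (if s = k ∧ t = j then 1 else 0) := by
          simp only [gcnt, List.countP_cons, hs]
          by_cases h1 : s = k ∧ t = j
          · obtain ⟨h1a, h1b⟩ := h1; subst h1a; subst h1b; simp
          · have : ((some (s, t) : Option (String × String)) == some (k, j)) = false := by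
              rw [beq_eq_false_iff_ne]
              simp only [ne_eq, Option.some.injEq, Prod.mk.injEq]
              tauto
            simp [this, h1]
        rw [hg]
        by_cases hk : k = s
        · subst hk
          rw [if_pos rfl, PySem.Dict.getD_modify]
          by_cases hj : j = t
          · subst hj
            rw [if_pos rfl, if_pos ⟨rfl, rfl⟩]
            push_cast; ring
          · rw [if_neg hj, if_neg (by tauto)]
            push_cast; ring
        · rw [if_neg hk, if_neg (by tauto)]
          push_cast; ring

theorem foldA_gives (gifts : List String) (k : String) :
    ∀ st, ((gifts.foldl stepA st).2.1).getD k 0 = st.2.1.getD k 0 + (scnt gifts k : Int) := by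
  induction gifts with
  | nil => intro st; simp [scnt]
  | cons g gs ih =>
      intro st
      rw [List.foldl_cons]
      rcases hs : split2 g with _ | ⟨s, t⟩
      · have hst : stepA st g = st := by simp [stepA, hs]
        rw [hst, ih]
        simp [scnt, hs]
      · have hst : stepA st g
            = (st.1.modify s PySem.Dict.empty (fun inner => inner.modify t 0 (· + 1)),
               st.2.1.modify s 0 (· + 1), st.2.2.modify t 0 (· + 1)) := by
          simp [stepA, hs]
        rw [hst, ih]
        simp only [PySem.Dict.getD_modify]
        have hg : scnt (g :: gs) k = scnt gs k + (if s = k then 1 else 0) := by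
          simp only [scnt, List.countP_cons, hs]
          by_cases h1 : s = k
          · subst h1; simp
          · simp [Option.map, h1]
        rw [hg]
        by_cases hk : k = s
        · subst hk; simp; omega
        · simp [hk, Ne.symm hk]

theorem foldA_gets (gifts : List String) (k : String) :
    ∀ st, ((gifts.foldl stepA st).2.2).getD k 0 = st.2.2.getD k 0 + (tcnt gifts k : Int) := by
  induction gifts with
  | nil => intro st; simp [tcnt]
  | cons g gs ih =>
      intro st
      rw [List.foldl_cons]
      rcases hs : split2 g with _ | ⟨s, t⟩
      · have hst : stepA st g = st := by simp [stepA, hs]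
        rw [hst, ih]
        simp [tcnt, hs]
      · have hst : stepA st g
            = (st.1.modify s PySem.Dict.empty (fun inner => inner.modify t 0 (· + 1)),
               st.2.1.modify s 0 (· + 1), st.2.2.modify t 0 (· + 1)) := by
          simp [stepA, hs]
        rw [hst, ih]
        simp only [PySem.Dict.getD_modify]
        have hg : tcnt (g :: gs) k = tcnt gs k + (if t = k then 1 else 0) := by
          simp only [tcnt, List.countP_cons, hs]
          by_cases h1 : t = k
          · subst h1; simp
          · simp [Option.map, h1]
        rw [hg]
        by_cases hk : k = t
        · subst hk; simp; omega
        · simp [hk, Ne.symm hk]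

theorem foldA_keys (friends gifts : List String) (hp : ∀ g ∈ gifts, wfGift friends g = true) :
    ∀ st, st.1.keys = PySem.Set.ofList friends →
      (∀ k, k ∈ PySem.Set.ofList friends → ((st.1.getD k PySem.Dict.empty).keys
            = (PySem.Set.ofList friends).filter (fun j => decide (j ≠ k)))) →
      ((gifts.foldl stepA st).1.keys = PySem.Set.ofList friends ∧
        ∀ k, k ∈ PySem.Set.ofList friends → ((gifts.foldl stepA st).1.getD k PySem.Dict.empty).keys
            = (PySem.Set.ofList friends).filter (fun j => decide (j ≠ k))) := by
  revert hp
  induction gifts with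
  | nil => intro _ st h1 h2; exact ⟨h1, h2⟩
  | cons g gs ih =>
      intro hp st h1 h2
      have hpg : wfGift friends g = true := hp g (by simp)
      have hp' : ∀ g' ∈ gs, wfGift friends g' = true := fun g' hg' => hp g' (by simp [hg'])
      rcases hsp : split2 g with _ | ⟨st2⟩
      · simp [wfGift, hsp] at hpg
      · obtain ⟨sd, tg⟩ := st2
        have hwf := hpg
        simp only [wfGift, hsp, Bool.and_eq_true, Bool.not_eq_true', beq_eq_false_iff_ne,
          List.contains_iff_mem] at hwf
        obtain ⟨⟨hsmem, htmem⟩, hne⟩ := hwf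
        have hsL : sd ∈ PySem.Set.ofList friends := (PySem.Set.mem_ofList friends sd).mpr hsmem
        have htL : tg ∈ PySem.Set.ofList friends := (PySem.Set.mem_ofList friends tg).mpr htmem
        rw [List.foldl_cons]
        have hst : stepA st g
            = (st.1.modify sd PySem.Dict.empty (fun inner => inner.modify tg 0 (· + 1)),
               st.2.1.modify sd 0 (· + 1), st.2.2.modify tg 0 (· + 1)) := by
          simp [stepA, hsp]
        rw [hst]
        apply ih hp'
        · rw [PySem.Dict.keys_modify, PySem.Dict.keys_insert_of_contains]
          · exact h1
          · rw [PySem.Dict.contains_iff_mem_keys, h1]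
            exact hsL
        · intro k hk
          rw [PySem.Dict.getD_modify]
          by_cases hks : k = sd
          · subst hks
            rw [if_pos rfl, PySem.Dict.keys_modify, PySem.Dict.keys_insert_of_contains]
            · exact h2 k hk
            · rw [PySem.Dict.contains_iff_mem_keys, h2 k hk]
              exact List.mem_filter.mpr ⟨htL, by simpa using Ne.symm hne⟩
          · rw [if_neg hks]
            exact h2 k hk

theorem A_spec (friends gifts : List String) (hp : Pre_solution friends gifts) :
    solution friends gifts = specV gifts (PySem.Set.ofList friends) := by
  unfold Pre_solution at hp
  have hinner0 : ∀ k, k ∈ PySem.Set.ofList friends →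
      ((giftdict0 friends).getD k PySem.Dict.empty).keys
        = (PySem.Set.ofList friends).filter (fun j => decide (j ≠ k)) := by
    intro k hk
    have hkf : k ∈ friends := (PySem.Set.mem_ofList friends k).mp hk
    unfold giftdict0
    rw [getD_foldl_insert_fun (v := fun k => initInner friends k), if_pos hkf,
      keys_initInner, ofList_filter]
  obtain ⟨hkeys1, hkeys2⟩ := foldA_keys friends gifts hp
    (giftdict0 friends, zeros0 friends, zeros0 friends) (keys_giftdict0 friends) hinner0
  have hnd : (List.foldl stepA (giftdict0 friends, zeros0 friends, zeros0 friends) gifts).1.keys.Nodup := by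
    rw [hkeys1]; exact PySem.Set.nodup_ofList friends
  have hpair : ∀ k j, ((List.foldl stepA (giftdict0 friends, zeros0 friends, zeros0 friends) gifts).1.getD
      k PySem.Dict.empty).getD j 0 = (gcnt gifts k j : Int) := by
    intro k j
    rw [foldA_pairs gifts k j, getD_giftdict0]
    ring
  have hgv : ∀ k, ((List.foldl stepA (giftdict0 friends, zeros0 friends, zeros0 friends) gifts).2.1).getD k 0
      = (scnt gifts k : Int) := by
    intro k; rw [foldA_gives gifts k, getD_zeros0]; ring
  have hgt : ∀ k, ((List.foldl stepA (giftdict0 friends, zeros0 friends, zeros0 friends) gifts).2.2).getD k 0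
      = (tcnt gifts k : Int) := by
    intro k; rw [foldA_gets gifts k, getD_zeros0]; ring
  show (List.foldl stepA (giftdict0 friends, zeros0 friends, zeros0 friends) gifts).1.items.foldl _ 0 = _
  rw [PySem.Dict.items_eq_map_keys _ hnd PySem.Dict.empty, List.foldl_map, hkeys1]
  unfold specV
  apply PySem.List.foldl_congr_mem
  intro ans k hk
  dsimp only
  congr 1
  -- inner count equals scoreF
  have hndk : ((List.foldl stepA (giftdict0 friends, zeros0 friends, zeros0 friends) gifts).1.getD
      k PySem.Dict.empty).keys.Nodup := by
    rw [hkeys2 k hk]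
    exact (PySem.Set.nodup_ofList friends).filter _
  rw [PySem.Dict.items_eq_map_keys _ hndk 0, List.foldl_map, hkeys2 k hk]
  have hbody : ∀ (cnt : Int), ∀ kk ∈ (PySem.Set.ofList friends).filter (fun j => decide (j ≠ k)),
      (if (gcnt gifts k kk : Int) > (gcnt gifts kk k : Int) then cnt + 1
       else if (gcnt gifts k kk : Int) = (gcnt gifts kk k : Int) then
         (if (scnt gifts k : Int) - (tcnt gifts k : Int) > (scnt gifts kk : Int) - (tcnt gifts kk : Int)
          then cnt + 1 else cnt)
       else cnt)
      = (if winB gifts k kk then cnt + 1 else cnt) := by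
    intro cnt kk _
    simp only [winB, netF, gt_iff_lt, Bool.or_eq_true, Bool.and_eq_true, decide_eq_true_eq]
    split_ifs <;> first | rfl | tauto
  calc (List.foldl (fun cnt kk =>
          if ((List.foldl stepA (giftdict0 friends, zeros0 friends, zeros0 friends) gifts).1.getD k PySem.Dict.empty).getD kk 0 >
             ((List.foldl stepA (giftdict0 friends, zeros0 friends, zeros0 friends) gifts).1.getD kk PySem.Dict.empty).getD k 0 then cnt + 1
          else if ((List.foldl stepA (giftdict0 friends, zeros0 friends, zeros0 friends) gifts).1.getD k PySem.Dict.empty).getD kk 0 =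
             ((List.foldl stepA (giftdict0 friends, zeros0 friends, zeros0 friends) gifts).1.getD kk PySem.Dict.empty).getD k 0 then
            (if (List.foldl stepA (giftdict0 friends, zeros0 friends, zeros0 friends) gifts).2.1.getD k 0 -
                (List.foldl stepA (giftdict0 friends, zeros0 friends, zeros0 friends) gifts).2.2.getD k 0 >
                (List.foldl stepA (giftdict0 friends, zeros0 friends, zeros0 friends) gifts).2.1.getD kk 0 -
                (List.foldl stepA (giftdict0 friends, zeros0 friends, zeros0 friends) gifts).2.2.getD kk 0 then cnt + 1 else cnt)
          else cnt) 0 ((PySem.Set.ofList friends).filter (fun j => decide (j ≠ k))))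
      = List.foldl (fun cnt kk => if winB gifts k kk then cnt + 1 else cnt) 0
          ((PySem.Set.ofList friends).filter (fun j => decide (j ≠ k))) := by
        apply PySem.List.foldl_congr_mem
        intro cnt kk hkk
        rw [hpair k kk, hpair kk k, hgv k, hgt k, hgv kk, hgt kk]
        exact hbody cnt kk hkk
    _ = (scoreF gifts (PySem.Set.ofList friends) k : Int) := by
        rw [PySem.List.foldl_if_add_one]
        unfold scoreF
        ring

-- ===== B-side lemmas =====

theorem pair_getD (gifts : List String) (a b : String) :
    (gifts.foldl stepP PySem.Dict.empty).getD (a, b) 0 = (gcnt gifts a b : Int) := by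
  have h : ∀ d : PySem.Dict (String × String) Int, gifts.foldl stepP d
      = (gifts.filterMap split2).foldl (fun d p => d.insert p (d.getD p 0 + 1)) d := by
    induction gifts with
    | nil => intro d; rfl
    | cons g gs ih =>
        intro d
        rcases hs : split2 g with _ | ⟨p⟩ <;>
          simp [stepP, hs, ih]
  rw [h, PySem.Dict.getD_foldl_insert_add_one]
  simp [List.count_filterMap, gcnt]

theorem sum_gcnt_eq_scnt (friends gifts : List String) (hp : ∀ g ∈ gifts, wfGift friends g = true)
    (k : String) :
    ((PySem.Set.ofList friends).map (fun j => (gcnt gifts k j : Int))).sum = (scnt gifts k : Int) := by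
  revert hp
  induction gifts with
  | nil => intro _; simp [gcnt, scnt]
  | cons g gs ih =>
      intro hp
      have hpg := hp g (by simp)
      have hp' : ∀ g' ∈ gs, wfGift friends g' = true := fun g' hg' => hp g' (by simp [hg'])
      have hmap : (PySem.Set.ofList friends).map (fun j => (gcnt (g :: gs) k j : Int))
          = (PySem.Set.ofList friends).map
              (fun j => (gcnt gs k j : Int) + (if split2 g == some (k, j) then 1 else 0)) := by
        apply List.map_congr_left
        intro j _
        simp only [gcnt, List.countP_cons]
        split <;> push_cast <;> ring
      rw [hmap, PySem.List.sum_map_add_int, ih hp']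
      have hone : ((PySem.Set.ofList friends).map
          (fun j => (if split2 g == some (k, j) then (1 : Int) else 0))).sum
          = if (split2 g).map Prod.fst == some k then 1 else 0 := by
        rcases hs : split2 g with _ | ⟨sd, tg⟩
        · simp [wfGift, hs] at hpg
        · have hwf := hpg
          simp only [wfGift, hs, Bool.and_eq_true, Bool.not_eq_true', beq_eq_false_iff_ne,
            List.contains_iff_mem] at hwf
          obtain ⟨⟨hsmem, htmem⟩, hne⟩ := hwf
          by_cases hsk : sd = k
          · subst hsk
            have : ∀ j ∈ PySem.Set.ofList friends,
                (if (some (sd, tg) : Option (String × String)) == some (sd, j) then (1 : Int) else 0)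
                  = (if j == tg then (1 : Int) else 0) := by
              intro j _
              by_cases hj : j = tg
              · simp [hj]
              · simp [hj, (Ne.symm hj : tg ≠ j)]
            rw [List.map_congr_left this]
            have := PySem.List.sum_map_ite_one_zero (fun j => j == tg) (PySem.Set.ofList friends)
            rw [this]
            have hc : (PySem.Set.ofList friends).countP (fun j => j == tg)
                = (PySem.Set.ofList friends).count tg := rfl
            rw [hc, List.count_eq_one_of_mem (PySem.Set.nodup_ofList friends)
              ((PySem.Set.mem_ofList friends tg).mpr htmem)]
            simp
          · have : ∀ j ∈ PySem.Set.ofList friends,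
                (if (some (sd, tg) : Option (String × String)) == some (k, j) then (1 : Int) else 0)
                  = (0 : Int) := by
              intro j _
              have : ((some (sd, tg) : Option (String × String)) == some (k, j)) = false := by
                rw [beq_eq_false_iff_ne]
                simp only [ne_eq, Option.some.injEq, Prod.mk.injEq]
                tauto
              simp [this]
            rw [List.map_congr_left this]
            simp [hsk]
      rw [hone]
      have hscnt : (scnt (g :: gs) k : Int)
          = (scnt gs k : Int) + (if (split2 g).map Prod.fst == some k then 1 else 0) := by
        simp only [scnt, List.countP_cons]
        split <;> push_cast <;> ring
      rw [hscnt]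

theorem sum_gcnt_eq_tcnt (friends gifts : List String) (hp : ∀ g ∈ gifts, wfGift friends g = true)
    (k : String) :
    ((PySem.Set.ofList friends).map (fun j => (gcnt gifts j k : Int))).sum = (tcnt gifts k : Int) := by
  revert hp
  induction gifts with
  | nil => intro _; simp [gcnt, tcnt]
  | cons g gs ih =>
      intro hp
      have hpg := hp g (by simp)
      have hp' : ∀ g' ∈ gs, wfGift friends g' = true := fun g' hg' => hp g' (by simp [hg'])
      have hmap : (PySem.Set.ofList friends).map (fun j => (gcnt (g :: gs) j k : Int))
          = (PySem.Set.ofList friends).map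
              (fun j => (gcnt gs j k : Int) + (if split2 g == some (j, k) then 1 else 0)) := by
        apply List.map_congr_left
        intro j _
        simp only [gcnt, List.countP_cons]
        split <;> push_cast <;> ring
      rw [hmap, PySem.List.sum_map_add_int, ih hp']
      have hone : ((PySem.Set.ofList friends).map
          (fun j => (if split2 g == some (j, k) then (1 : Int) else 0))).sum
          = if (split2 g).map Prod.snd == some k then 1 else 0 := by
        rcases hs : split2 g with _ | ⟨sd, tg⟩
        · simp [wfGift, hs] at hpg
        · have hwf := hpg
          simp only [wfGift, hs, Bool.and_eq_true, Bool.not_eq_true', beq_eq_false_iff_ne,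
            List.contains_iff_mem] at hwf
          obtain ⟨⟨hsmem, htmem⟩, hne⟩ := hwf
          by_cases htk : tg = k
          · subst htk
            have : ∀ j ∈ PySem.Set.ofList friends,
                (if (some (sd, tg) : Option (String × String)) == some (j, tg) then (1 : Int) else 0)
                  = (if j == sd then (1 : Int) else 0) := by
              intro j _
              by_cases hj : j = sd
              · simp [hj]
              · simp [hj, (Ne.symm hj : sd ≠ j)]
            rw [List.map_congr_left this]
            have := PySem.List.sum_map_ite_one_zero (fun j => j == sd) (PySem.Set.ofList friends)
            rw [this]
            have hc : (PySem.Set.ofList friends).countP (fun j => j == sd)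
                = (PySem.Set.ofList friends).count sd := rfl
            rw [hc, List.count_eq_one_of_mem (PySem.Set.nodup_ofList friends)
              ((PySem.Set.mem_ofList friends sd).mpr hsmem)]
            simp
          · have : ∀ j ∈ PySem.Set.ofList friends,
                (if (some (sd, tg) : Option (String × String)) == some (j, k) then (1 : Int) else 0)
                  = (0 : Int) := by
              intro j _
              have : ((some (sd, tg) : Option (String × String)) == some (j, k)) = false := by
                rw [beq_eq_false_iff_ne]
                simp only [ne_eq, Option.some.injEq, Prod.mk.injEq]
                tauto
              simp [this]
            rw [List.map_congr_left this]
            simp [htk]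
      rw [hone]
      have htcnt : (tcnt (g :: gs) k : Int)
          = (tcnt gs k : Int) + (if (split2 g).map Prod.snd == some k then 1 else 0) := by
        simp only [tcnt, List.countP_cons]
        split <;> push_cast <;> ring
      rw [htcnt]

def pairsOf : List String → List (String × String)
  | [] => []
  | a :: r => r.map (fun b => (a, b)) ++ pairsOf r

theorem mem_pairsOf (l : List String) (p : String × String) (h : p ∈ pairsOf l) :
    p.1 ∈ l ∧ p.2 ∈ l := by
  induction l with
  | nil => simp [pairsOf] at h
  | cons a r ih =>
      simp only [pairsOf, List.mem_append, List.mem_map] at h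
      rcases h with ⟨b, hb, rfl⟩ | h
      · exact ⟨by simp, by simp [hb]⟩
      · obtain ⟨h1, h2⟩ := ih h
        exact ⟨by simp [h1], by simp [h2]⟩

theorem double_loop_eq_pairsOf (pair : PySem.Dict (String × String) Int)
    (net : PySem.Dict String Int) (order : List String) :
    ∀ (xs : List String) (n : Int) (w : PySem.Dict String Int), 0 ≤ n → xs = order.drop n.toNat →
      (PySem.List.enumerate xs n).foldl (fun w ia =>
          (PySem.List.slice order (some (ia.1 + 1)) none).foldl (stepW pair net ia.2) w) w
        = (pairsOf xs).foldl (fun w p => stepW pair net p.1 w p.2) w := by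
  intro xs
  induction xs with
  | nil => intro n w _ _; simp [PySem.List.enumerate, pairsOf]
  | cons a xs' ih =>
      intro n w hn hdrop
      have hdrop' : xs' = order.drop (n + 1).toNat := by
        have h1 : (n + 1).toNat = n.toNat + 1 := by omega
        rw [h1, ← List.drop_drop, ← hdrop]
        simp
      have henum : PySem.List.enumerate (a :: xs') n = (n, a) :: PySem.List.enumerate xs' (n + 1) := by
        simp [PySem.List.enumerate]
      rw [henum, List.foldl_cons]
      have hslice : PySem.List.slice order (some (n + 1)) none = xs' := by
        rw [PySem.List.slice_from order (by omega : (0:Int) ≤ n + 1)]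
        exact hdrop'.symm
      show (PySem.List.enumerate xs' (n + 1)).foldl _
          ((PySem.List.slice order (some (n + 1)) none).foldl (stepW pair net a) w) = _
      rw [hslice, ih (n + 1) (xs'.foldl (stepW pair net a) w) (by omega) hdrop']
      show _ = (pairsOf (a :: xs')).foldl (fun w p => stepW pair net p.1 w p.2) w
      simp only [pairsOf, List.foldl_append, List.foldl_map]

def winnerIs (gifts : List String) (k : String) (p : String × String) : Bool :=
  if winB gifts p.1 p.2 then p.1 == k
  else if winB gifts p.2 p.1 then p.2 == k
  else false

theorem winB_asymm (gifts : List String) (a b : String) (h : winB gifts a b = true) :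
    winB gifts b a = false := by
  simp only [winB, Bool.or_eq_true, Bool.and_eq_true, decide_eq_true_eq,
    Bool.or_eq_false_iff, Bool.and_eq_false_iff, decide_eq_false_iff_not, not_lt] at h ⊢
  rcases h with h | ⟨h1, h2⟩
  · exact ⟨by omega, Or.inl (by omega)⟩
  · exact ⟨by omega, Or.inr (by omega)⟩

theorem stepW_eq (friends gifts : List String) (_hp : ∀ g ∈ gifts, wfGift friends g = true)
    (net : PySem.Dict String Int)
    (hnet : ∀ k ∈ PySem.Set.ofList friends, net.getD k 0 = netF gifts k)
    (a b : String) (ha : a ∈ PySem.Set.ofList friends) (hb : b ∈ PySem.Set.ofList friends)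
    (w : PySem.Dict String Int) :
    stepW (gifts.foldl stepP PySem.Dict.empty) net a w b
      = (if winB gifts a b then w.insert a (w.getD a 0 + 1)
         else if winB gifts b a then w.insert b (w.getD b 0 + 1)
         else w) := by
  unfold stepW
  rw [pair_getD gifts a b, pair_getD gifts b a, hnet a ha, hnet b hb]
  have h1 : ((gcnt gifts a b : Int) > (gcnt gifts b a : Int) ∨
      ((gcnt gifts a b : Int) = (gcnt gifts b a : Int) ∧ netF gifts a > netF gifts b))
      ↔ winB gifts a b = true := by
    simp only [winB, Bool.or_eq_true, Bool.and_eq_true, decide_eq_true_eq, gt_iff_lt]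
  have h2 : ((gcnt gifts b a : Int) > (gcnt gifts a b : Int) ∨
      ((gcnt gifts b a : Int) = (gcnt gifts a b : Int) ∧ netF gifts b > netF gifts a))
      ↔ winB gifts b a = true := by
    simp only [winB, Bool.or_eq_true, Bool.and_eq_true, decide_eq_true_eq, gt_iff_lt]
  simp only [h1, h2]

theorem tally_getD (gifts : List String) (k : String) :
    ∀ (ps : List (String × String)) (w : PySem.Dict String Int),
      (ps.foldl (fun w p => if winB gifts p.1 p.2 then w.insert p.1 (w.getD p.1 0 + 1)
          else if winB gifts p.2 p.1 then w.insert p.2 (w.getD p.2 0 + 1) else w) w).getD k 0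
        = w.getD k 0 + (ps.countP (winnerIs gifts k) : Int) := by
  intro ps
  induction ps with
  | nil => intro w; simp
  | cons p ps ih =>
      intro w
      rw [List.foldl_cons, List.countP_cons]
      by_cases h1 : winB gifts p.1 p.2 = true
      · rw [if_pos h1, ih, PySem.Dict.getD_insert]
        by_cases hk : k = p.1
        · rw [if_pos hk]
          have hw : winnerIs gifts k p = true := by simp [winnerIs, h1, hk]
          rw [if_pos hw, hk]
          push_cast; ring
        · rw [if_neg hk]
          have : winnerIs gifts k p = false := by
            simp only [winnerIs, if_pos h1]
            rw [beq_eq_false_iff_ne]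
            exact fun h => hk h.symm
          rw [if_neg (by simp [this])]
          push_cast; ring
      · rw [if_neg h1]
        by_cases h2 : winB gifts p.2 p.1 = true
        · rw [if_pos h2, ih, PySem.Dict.getD_insert]
          by_cases hk : k = p.2
          · rw [if_pos hk]
            have hw : winnerIs gifts k p = true := by simp [winnerIs, h1, h2, hk]
            rw [if_pos hw, hk]
            push_cast; ring
          · rw [if_neg hk]
            have : winnerIs gifts k p = false := by
              simp only [winnerIs, if_neg h1, if_pos h2]
              rw [beq_eq_false_iff_ne]
              exact fun h => hk h.symm
            rw [if_neg (by simp [this])]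
            push_cast; ring
        · rw [if_neg h2, ih]
          have : winnerIs gifts k p = false := by simp [winnerIs, h1, h2]
          rw [if_neg (by simp [this])]
          push_cast; ring

theorem tally_keys (gifts : List String) :
    ∀ (ps : List (String × String)) (w : PySem.Dict String Int),
      (∀ p ∈ ps, p.1 ∈ w.keys ∧ p.2 ∈ w.keys) →
      (ps.foldl (fun w p => if winB gifts p.1 p.2 then w.insert p.1 (w.getD p.1 0 + 1)
          else if winB gifts p.2 p.1 then w.insert p.2 (w.getD p.2 0 + 1) else w) w).keys = w.keys := by
  intro ps
  induction ps with
  | nil => intro w _; rfl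
  | cons p ps ih =>
      intro w hmem
      obtain ⟨hp1, hp2⟩ := hmem p (by simp)
      have hrest : ∀ q ∈ ps, q.1 ∈ w.keys ∧ q.2 ∈ w.keys := fun q hq => hmem q (by simp [hq])
      rw [List.foldl_cons]
      by_cases h1 : winB gifts p.1 p.2 = true
      · rw [if_pos h1]
        have hkeq : (w.insert p.1 (w.getD p.1 0 + 1)).keys = w.keys :=
          PySem.Dict.keys_insert_of_contains w _ ((PySem.Dict.contains_iff_mem_keys w p.1).mpr hp1)
        rw [ih _ (by rw [hkeq]; exact hrest), hkeq]
      · rw [if_neg h1]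
        by_cases h2 : winB gifts p.2 p.1 = true
        · rw [if_pos h2]
          have hkeq : (w.insert p.2 (w.getD p.2 0 + 1)).keys = w.keys :=
            PySem.Dict.keys_insert_of_contains w _ ((PySem.Dict.contains_iff_mem_keys w p.2).mpr hp2)
          rw [ih _ (by rw [hkeq]; exact hrest), hkeq]
        · rw [if_neg h2]
          exact ih _ hrest

theorem countP_winnerIs_notmem (gifts : List String) (k : String) (l : List String) (hk : k ∉ l) :
    (pairsOf l).countP (winnerIs gifts k) = 0 := by
  induction l with
  | nil => simp [pairsOf]
  | cons a r ih =>
      have hka : k ≠ a := fun h => hk (by simp [h])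
      have hkr : k ∉ r := fun h => hk (by simp [h])
      simp only [pairsOf, List.countP_append, List.countP_map]
      rw [ih hkr, List.countP_eq_zero.mpr, Nat.add_zero]
      intro b hb
      simp only [Function.comp_apply, winnerIs]
      split
      · simp only [beq_iff_eq]
        exact fun h => hka h.symm
      · split
        · simp only [beq_iff_eq]
          exact fun h => hkr (h ▸ hb)
        · simp

theorem countP_winnerIs (gifts : List String) (l : List String) (hl : l.Nodup) :
    ∀ k ∈ l, (pairsOf l).countP (winnerIs gifts k)
      = (l.filter (fun j => decide (j ≠ k))).countP (winB gifts k) := by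
  induction l with
  | nil => intro k hk; simp at hk
  | cons a r ih =>
      intro k hk
      have hnd' : r.Nodup := hl.of_cons
      have hanr : a ∉ r := by simp at hl; exact hl.1
      simp only [pairsOf, List.countP_append, List.countP_map]
      by_cases hka : k = a
      · subst hka
        rw [countP_winnerIs_notmem gifts k r hanr, Nat.add_zero]
        have hfil : (k :: r).filter (fun j => decide (j ≠ k)) = r.filter (fun j => decide (j ≠ k)) := by
          simp
        rw [hfil]
        have hfil2 : r.filter (fun j => decide (j ≠ k)) = r := by
          rw [List.filter_eq_self]
          intro b hb
          simp only [decide_eq_true_eq]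
          exact fun h => hanr (h ▸ hb)
        rw [hfil2]
        apply List.countP_congr
        intro b _
        simp only [Function.comp_apply, winnerIs]
        constructor
        · intro h
          split at h
          · assumption
          · split at h
            · rename_i h1 h2
              have := winB_asymm gifts b k h2
              rw [beq_iff_eq] at h
              subst h
              simp_all
            · simp at h
        · intro h
          rw [if_pos h]
          simp
      · have hkr : k ∈ r := by
          rcases List.mem_cons.mp hk with h | h
          · exact absurd h hka
          · exact h
        rw [ih hnd' k hkr]
        have hfil : (a :: r).filter (fun j => decide (j ≠ k)) = a :: r.filter (fun j => decide (j ≠ k)) := by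
          simp only [List.filter_cons]
          rw [if_pos (by simpa using Ne.symm hka)]
        rw [hfil, List.countP_cons]
        have hone : r.countP ((winnerIs gifts k) ∘ (fun b => (a, b)))
            = if winB gifts k a = true then 1 else 0 := by
          have hcongr : r.countP ((winnerIs gifts k) ∘ (fun b => (a, b)))
              = r.countP (fun b => decide (b = k) && winB gifts k a) := by
            apply List.countP_congr
            intro b hb
            simp only [Function.comp_apply, winnerIs]
            by_cases hbk : b = k
            · subst hbk
              by_cases hw : winB gifts b a = true
              · have := winB_asymm gifts b a hw
                simp [this, hw]
              · by_cases hw2 : winB gifts a b = true <;>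
                  simp [hw, hw2, (Ne.symm hka : a ≠ b)]
            · by_cases hw2 : winB gifts a b = true
              · simp [hw2, hbk]
                exact fun h => absurd h.symm (fun hh => hka (hh ▸ rfl))
              · by_cases hw : winB gifts b a = true <;> simp [hw, hw2, hbk]
          rw [hcongr]
          by_cases hw : winB gifts k a = true
          · rw [if_pos hw]
            have : r.countP (fun b => decide (b = k) && winB gifts k a)
                = r.countP (fun b => b == k) := by
              apply List.countP_congr
              intro b _
              simp [hw]
            rw [this]
            have : r.countP (fun b => b == k) = r.count k := rfl
            rw [this, List.count_eq_one_of_mem hnd' hkr]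
          · rw [if_neg hw]
            rw [List.countP_eq_zero.mpr]
            intro b _
            simp [hw]
        rw [hone]
        by_cases hw : winB gifts k a = true <;> simp [hw]; omega

theorem sum_map_sub_int (l : List String) (f g : String → Int) :
    (l.map (fun x => f x - g x)).sum = (l.map f).sum - (l.map g).sum := by
  induction l with
  | nil => simp
  | cons x t ih => simp [ih]; ring

theorem maxD_map_score (v : String → Int) (hv : ∀ k, 0 ≤ v k) (L : List String) :
    PySem.List.maxD (L.map v) (fun x => x) 0 = L.foldl (fun ans k => max ans (v k)) 0 := by
  cases L with
  | nil => rfl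
  | cons a r =>
      simp only [List.map_cons, PySem.List.maxD, PySem.List.max?_id_cons, Option.getD_some,
        List.foldl_cons, List.foldl_map]
      rw [max_eq_right (hv a)]

theorem B_spec (friends gifts : List String) (hp : Pre_solution friends gifts) :
    solution_alt friends gifts = specV gifts (PySem.Set.ofList friends) := by
  unfold Pre_solution at hp
  have hnodL := PySem.Set.nodup_ofList friends
  have horder : friends.foldl (fun u f => if u.contains f then u else u ++ [f]) ([] : List String)
      = PySem.Set.ofList friends := by
    rw [PySem.Set.ofList_eq_foldl]; rfl
  simp only [solution_alt]
  rw [horder]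
  set L := PySem.Set.ofList friends with hL
  set pair := gifts.foldl stepP PySem.Dict.empty with hpaird
  set netd := L.foldl (fun d k =>
      d.insert k ((L.map (fun j => pair.getD (k, j) 0 - pair.getD (j, k) 0)).sum))
      PySem.Dict.empty with hnetd
  set wins0 := L.foldl (fun d k => d.insert k (0 : Int)) PySem.Dict.empty with hwins0
  have hnet : ∀ k ∈ L, netd.getD k 0 = netF gifts k := by
    intro k hk
    rw [hnetd, getD_foldl_insert_fun
      (v := fun k => ((L.map (fun j => pair.getD (k, j) 0 - pair.getD (j, k) 0)).sum)), if_pos hk]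
    have hm : L.map (fun j => pair.getD (k, j) 0 - pair.getD (j, k) 0)
        = L.map (fun j => (gcnt gifts k j : Int) - (gcnt gifts j k : Int)) := by
      apply List.map_congr_left
      intro j _
      rw [hpaird, pair_getD gifts k j, pair_getD gifts j k]
    rw [hm, sum_map_sub_int, hL, sum_gcnt_eq_scnt friends gifts hp k,
      sum_gcnt_eq_tcnt friends gifts hp k]
    rfl
  have hw0 : ∀ k, wins0.getD k 0 = 0 := by
    intro k
    rw [hwins0, getD_foldl_insert_fun (v := fun _ => (0 : Int))]
    split <;> simp
  have hw0keys : wins0.keys = L := by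
    rw [hwins0, PySem.Dict.keys_foldl_insert, PySem.Dict.keys_empty, update_nil_eq_ofList,
      ofList_eq_self_of_nodup L hnodL]
  rw [double_loop_eq_pairsOf pair netd L L 0 wins0 (le_refl 0) (by simp)]
  have hfold : (pairsOf L).foldl (fun w p => stepW pair netd p.1 w p.2) wins0
      = (pairsOf L).foldl (fun w p => if winB gifts p.1 p.2 then w.insert p.1 (w.getD p.1 0 + 1)
          else if winB gifts p.2 p.1 then w.insert p.2 (w.getD p.2 0 + 1) else w) wins0 := by
    apply PySem.List.foldl_congr_mem
    intro w p hpmem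
    obtain ⟨h1, h2⟩ := mem_pairsOf L p hpmem
    rw [hpaird]
    exact stepW_eq friends gifts hp netd hnet p.1 p.2 h1 h2 w
  rw [hfold]
  have hWkeys : ((pairsOf L).foldl (fun w p => if winB gifts p.1 p.2 then w.insert p.1 (w.getD p.1 0 + 1)
      else if winB gifts p.2 p.1 then w.insert p.2 (w.getD p.2 0 + 1) else w) wins0).keys = L := by
    rw [tally_keys gifts (pairsOf L) wins0, hw0keys]
    intro p hpmem
    obtain ⟨h1, h2⟩ := mem_pairsOf L p hpmem
    rw [hw0keys]
    exact ⟨h1, h2⟩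
  have hWnod : ((pairsOf L).foldl (fun w p => if winB gifts p.1 p.2 then w.insert p.1 (w.getD p.1 0 + 1)
      else if winB gifts p.2 p.1 then w.insert p.2 (w.getD p.2 0 + 1) else w) wins0).keys.Nodup := by
    rw [hWkeys]; exact hnodL
  rw [PySem.Dict.values_eq_map_keys _ hWnod 0, hWkeys]
  have hmap : L.map (fun k => ((pairsOf L).foldl (fun w p => if winB gifts p.1 p.2 then w.insert p.1 (w.getD p.1 0 + 1)
      else if winB gifts p.2 p.1 then w.insert p.2 (w.getD p.2 0 + 1) else w) wins0).getD k 0)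
      = L.map (fun k => (scoreF gifts L k : Int)) := by
    apply List.map_congr_left
    intro k hk
    rw [tally_getD gifts k (pairsOf L) wins0, hw0, countP_winnerIs gifts L hnodL k hk]
    unfold scoreF
    ring
  rw [hmap, maxD_map_score (fun k => (scoreF gifts L k : Int)) (fun k => by positivity) L]
  rfl

-- ===== VERDICT (by name: the statement is the Claim_ definition above) =====
theorem solution_spec : Claim_equal_solution := by
  intro friends gifts _hd hp
  unfold Spec_solution
  rw [A_spec friends gifts hp, B_spec friends gifts hp]
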